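-- pv_equiv track=rewrite | github.com/martinkostelnik/mzk-karticky | src/alignment/align_levenshtein.py | merge_db_records
-- ===== SOURCE A (Python) =====
-- def merge_db_records(data):
--     text = ""
--     boundaries = []
--
--     for key in data:
--         text += f"{data[key].strip()} "
--         boundaries.append(len(text) - 1)
--
--     text = text.strip()
--
--     return text, boundaries
-- ===== SOURCE B (Python) =====
-- def merge_db_records(data):
--     values = [data[key].strip() for key in data]
--     # total length of the space-terminated concatenation
--     total = sum(len(v) for v in values) + len(values)
--     # boundaries computed back-to-front by subtracting piece lengths from the total
--     boundaries = []
--     rem = total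
--     for v in reversed(values):
--         boundaries.append(rem - 1)
--         rem -= len(v) + 1
--     boundaries.reverse()
--     return " ".join(values).strip(), boundaries
-- ===== Notes on version B (the rewrite author's own statement) =====
-- stated objective: alternative
-- what changed: A makes one forward pass growing the text string and reading each boundary off its current length; B works in stages and in the opposite direction: it strips the values, computes the total length once, derives the boundaries back-to-front by subtracting piece lengths from the total (then reverses), and builds the text with a single ' '.join().strip().
import Mathlib
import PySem

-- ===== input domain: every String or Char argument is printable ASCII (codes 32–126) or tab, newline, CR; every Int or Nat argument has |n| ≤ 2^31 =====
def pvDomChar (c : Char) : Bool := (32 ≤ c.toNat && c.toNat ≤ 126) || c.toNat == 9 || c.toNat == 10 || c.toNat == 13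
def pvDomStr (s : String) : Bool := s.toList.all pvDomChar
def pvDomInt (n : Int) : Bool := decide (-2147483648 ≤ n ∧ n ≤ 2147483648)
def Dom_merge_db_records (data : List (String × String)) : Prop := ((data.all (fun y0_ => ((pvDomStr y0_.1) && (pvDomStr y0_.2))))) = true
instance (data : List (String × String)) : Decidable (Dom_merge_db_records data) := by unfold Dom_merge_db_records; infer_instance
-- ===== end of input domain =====

-- B replaces A's forward growing-string pass by staged passes: strip the values, take the
-- total length once, derive the boundaries back-to-front by subtraction, join once (same cost).

-- ===== PORT A =====
-- text += f"{data[key].strip()} "; boundaries.append(len(text) - 1); finally text.strip()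
def merge_db_records (data : List (String × String)) : String × List Int :=
  let r := data.foldl
    (fun (st : List Char × List Int) kv =>
      let text := st.1 ++ PySem.Chars.strip kv.2.toList ++ [' ']
      (text, st.2 ++ [PySem.Chars.len text - 1]))
    ([], [])
  (String.ofList (PySem.Chars.strip r.1), r.2)

-- ===== PORT B =====
def merge_db_records_alt (data : List (String × String)) : String × List Int :=
  let values := data.map (fun kv => PySem.Chars.strip kv.2.toList)
  -- total = sum(len(v) for v in values) + len(values)
  let total : Int := (values.foldl (fun s v => s + PySem.Chars.len v) 0) + values.length
  -- for v in reversed(values): boundaries.append(rem - 1); rem -= len(v) + 1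
  let r := values.reverse.foldl
    (fun (st : List Int × Int) v => (st.1 ++ [st.2 - 1], st.2 - (PySem.Chars.len v + 1)))
    ([], total)
  -- boundaries.reverse()
  let boundaries := r.1.reverse
  (String.ofList (PySem.Chars.strip (PySem.Chars.join [' '] values)), boundaries)

-- ===== PRECONDITION & SPEC =====
def Spec_merge_db_records (data : List (String × String)) (out : String × List Int) : Prop := out = merge_db_records_alt data
instance (data : List (String × String)) (out : String × List Int) : Decidable (Spec_merge_db_records data out) := by unfold Spec_merge_db_records; infer_instance

-- ===== CLAIM =====
def Claim_equal_merge_db_records : Prop := ∀ (data : List (String × String)), Dom_merge_db_records data → Spec_merge_db_records data (merge_db_records data)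

-- ===== LEMMAS AND PROOFS =====

-- the running prefix sums of (len v + 1), each minus 1: A's boundary list
def pvAccum : Int → List (List Char) → List Int
  | _, [] => []
  | t, v :: vs => (t + ((v.length : Int) + 1) - 1) :: pvAccum (t + ((v.length : Int) + 1)) vs

def pvS (vs : List (List Char)) : Int := (vs.map (fun v => (v.length : Int) + 1)).sum

-- A's loop characterised
theorem mergeA_foldl_eq (data : List (String × String)) (t : List Char) (bs : List Int) :
    data.foldl
      (fun (st : List Char × List Int) kv =>
        let text := st.1 ++ PySem.Chars.strip kv.2.toList ++ [' ']
        (text, st.2 ++ [PySem.Chars.len text - 1]))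
      (t, bs)
    = (t ++ ((data.map (fun kv => PySem.Chars.strip kv.2.toList)).map (fun v => v ++ [' '])).flatten,
       bs ++ pvAccum (t.length : Int) (data.map (fun kv => PySem.Chars.strip kv.2.toList))) := by
  induction data generalizing t bs with
  | nil => simp [pvAccum]
  | cons kv rest ih =>
    simp only [List.foldl_cons, List.map_cons, pvAccum, List.flatten_cons]
    rw [ih]
    refine Prod.ext (by simp) ?_
    simp only [List.append_assoc, List.singleton_append, PySem.Chars.len_eq]
    congr 1
    congr 1
    · simp
    · congr 1; simp

-- B's backward loop characterised (via foldr after List.foldl_reverse)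
theorem backB_eq (vs : List (List Char)) (c : Int) :
    vs.foldr (fun v (st : List Int × Int) => (st.1 ++ [st.2 - 1], st.2 - (PySem.Chars.len v + 1))) ([], c)
    = ((pvAccum (c - pvS vs) vs).reverse, c - pvS vs) := by
  induction vs with
  | nil => simp [pvAccum, pvS]
  | cons v vs ih =>
    rw [List.foldr_cons, ih]
    simp only [pvAccum, pvS, List.map_cons, List.sum_cons, PySem.Chars.len_eq,
      List.reverse_cons, Prod.mk.injEq]
    refine ⟨?_, by ring⟩
    have h : c - ((v.length : Int) + 1 + ((vs.map (fun v => (v.length : Int) + 1)).sum)) + ((v.length : Int) + 1)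
        = c - ((vs.map (fun v => (v.length : Int) + 1)).sum) := by ring
    rw [h]

-- the length-sum fold restarted from an arbitrary accumulator
theorem foldl_len_shift (vs : List (List Char)) (a : Int) :
    vs.foldl (fun s v => s + PySem.Chars.len v) a
      = a + vs.foldl (fun s v => s + PySem.Chars.len v) 0 := by
  induction vs generalizing a with
  | nil => simp
  | cons w ws ih => rw [List.foldl_cons, List.foldl_cons, ih, ih (0 + PySem.Chars.len w)]; ring

-- sum of lengths + count = sum of (length + 1)
theorem sum_len_add_card (vs : List (List Char)) :
    (vs.foldl (fun s v => s + PySem.Chars.len v) 0) + (vs.length : Int) = pvS vs := by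
  induction vs with
  | nil => simp [pvS]
  | cons v vs ih =>
    rw [List.foldl_cons, foldl_len_shift]
    simp only [pvS, List.map_cons, List.sum_cons, PySem.Chars.len_eq, List.length_cons] at *
    push_cast
    omega

-- the space-terminated concatenation vs " ".join
theorem flatten_eq_join (vs : List (List Char)) :
    (vs.map (fun v => v ++ [' '])).flatten
    = if vs = [] then [] else PySem.Chars.join [' '] vs ++ [' '] := by
  induction vs with
  | nil => simp
  | cons v vs ih =>
    cases vs with
    | nil => simp [PySem.Chars.join_singleton]
    | cons w ws =>
      simp only [List.map_cons, List.flatten_cons] at *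
      rw [ih]
      simp [PySem.Chars.join_cons_cons]

theorem isspace_space : PySem.Chars.isspace ' ' = true := by decide

theorem rstrip_append_space (y : List Char) :
    PySem.Chars.rstrip (y ++ [' ']) = PySem.Chars.rstrip y := by
  simp [PySem.Chars.rstrip, isspace_space]

theorem strip_append_space (x : List Char) :
    PySem.Chars.strip (x ++ [' ']) = PySem.Chars.strip x := by
  simp only [PySem.Chars.strip, PySem.Chars.lstrip, List.dropWhile_append]
  split
  · next h =>
    rw [List.isEmpty_iff] at h
    simp [PySem.Chars.rstrip, List.dropWhile, isspace_space, h]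
  · exact rstrip_append_space _

-- ===== VERDICT =====
theorem merge_db_records_spec : Claim_equal_merge_db_records := by
  intro data _
  unfold Spec_merge_db_records merge_db_records merge_db_records_alt
  rw [mergeA_foldl_eq]
  simp only [List.nil_append, List.foldl_reverse]
  have hb := backB_eq (data.map (fun kv => PySem.Chars.strip kv.2.toList))
    ((data.map (fun kv => PySem.Chars.strip kv.2.toList)).foldl (fun s v => s + PySem.Chars.len v) 0
      + (data.map (fun kv => PySem.Chars.strip kv.2.toList)).length)
  rw [hb, sum_len_add_card]
  simp only [sub_self, List.reverse_reverse]
  refine Prod.ext ?_ rfl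
  rw [flatten_eq_join]
  split
  · next h => simp [h, PySem.Chars.join, List.intercalate]
  · rw [strip_append_space]
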